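-- pv_equiv track=rewrite | github.com/taimooransari/DSA | LAB05-BINARY_SEARCH.py | binary_search_recursive_modified
-- ===== SOURCE A (Python) =====
-- def binary_search_recursive_modified(lst,item,low,high):
--     if(low<=high):
--         mid=(low+high)//2
--         if(lst[mid]==item):
--             return mid
--         elif(lst[mid]>item):
--             high = mid-1
--         elif(lst[mid]<item):
--             low = mid+1
--         if(low>high):
--             if(lst[mid]>=item):
--                 lst.insert(mid,item)
--                 return mid
--             elif(lst[mid]<item):
--                 lst.insert(mid+1,item)
--                 return mid+1
--         index = binary_search_recursive_modified(lst,item,low,high)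
--         return index
-- ===== SOURCE B (Python) =====
-- def _bs_step(lst, item, low, high):
--     # One refinement step of the search: ('hit', i) on a match,
--     # else the narrowed ('range', lo, hi).
--     mid = (low + high) // 2
--     v = lst[mid]
--     if v == item:
--         return ('hit', mid)
--     if v < item:
--         return ('range', mid + 1, high)
--     return ('range', low, mid - 1)
--
-- def binary_search_recursive_modified(lst, item, low, high):
--     # State-machine decomposition: iterate the step until a hit or an empty
--     # range; on a miss the final low is the insertion point (one insert here
--     # replaces A's per-step insertion checks). Mutates lst like A does.
--     if low > high:
--         return None
--     state = ('range', low, high)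
--     while state[0] == 'range' and state[1] <= state[2]:
--         state = _bs_step(lst, item, state[1], state[2])
--     if state[0] == 'hit':
--         return state[1]
--     pos = state[1]
--     lst.insert(pos, item)
--     return pos
-- ===== Notes on version B (the rewrite author's own statement) =====
-- stated objective: alternative
-- what changed: A's recursion with per-step insertion checks is replaced by a state machine: a step function ('hit' index or narrowed 'range') iterated by a while loop, with a single insert at the final low on a miss.
-- outside the precondition, e.g. on binary_search_recursive_modified([1, 2, 3], 2, -3, 5): A returns 1, B returns 1
import Mathlib
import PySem

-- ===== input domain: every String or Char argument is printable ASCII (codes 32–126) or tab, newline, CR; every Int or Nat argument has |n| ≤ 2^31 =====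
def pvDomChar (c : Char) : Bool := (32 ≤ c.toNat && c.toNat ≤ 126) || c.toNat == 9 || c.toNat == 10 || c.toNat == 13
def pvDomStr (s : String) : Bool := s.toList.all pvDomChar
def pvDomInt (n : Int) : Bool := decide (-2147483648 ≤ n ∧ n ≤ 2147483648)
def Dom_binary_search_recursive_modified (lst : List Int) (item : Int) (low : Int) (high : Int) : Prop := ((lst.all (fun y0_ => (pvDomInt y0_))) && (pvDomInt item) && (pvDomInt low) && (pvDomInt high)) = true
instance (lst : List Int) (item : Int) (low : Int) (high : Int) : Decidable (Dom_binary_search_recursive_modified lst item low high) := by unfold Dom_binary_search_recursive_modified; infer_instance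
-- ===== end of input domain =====

-- B replaces A's recursion-with-inline-insertion checks by a state machine (a step function
-- iterated until a hit or an empty range; the final low is the single insertion point).
-- Objective: alternative decomposition, same cost. Both Pythons mutate `lst` identically
-- (one insert on a miss); the theorems here are about the RETURN value only.

-- ===== PORT A =====
-- Literal port of A. `lst[mid]` is pyGet?; `none` on its IndexError (outside Pre_).
-- The elif chain `== / > / <` is exhaustive on Int, so the final elif is the final else here.
def binary_search_recursive_modified (lst : List Int) (item : Int) (low : Int) (high : Int) : Option Int :=
  if low ≤ high then
    let mid := PySem.Int.floordiv (low + high) 2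
    match PySem.List.pyGet? lst mid with
    | none => none  -- IndexError in Python; excluded by Pre_
    | some v =>
      if v = item then some mid
      else if v > item then
        -- high = mid - 1; then the `if low > high` insertion check (v ≥ item holds)
        if low > mid - 1 then some mid
        else binary_search_recursive_modified lst item low (mid - 1)
      else
        -- v < item; low = mid + 1; then the insertion check (v < item holds)
        if mid + 1 > high then some (mid + 1)
        else binary_search_recursive_modified lst item (mid + 1) high
  else none
termination_by (high - low + 1).toNat
decreasing_by
  · have := PySem.Int.floordiv_two_mid_bounds (lo := low) (hi := high) (by omega)
    omega
  · have := PySem.Int.floordiv_two_mid_bounds (lo := low) (hi := high) (by omega)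
    omega

-- ===== PORT B =====
-- The search state of Source B: ('hit', i) or ('range', lo, hi).
inductive BSState where
  | hit : Int → BSState
  | range : Int → Int → BSState
deriving DecidableEq, Repr

-- _bs_step of Source B: one refinement step.
def bsStep (lst : List Int) (item : Int) (low : Int) (high : Int) : BSState :=
  let mid := PySem.Int.floordiv (low + high) 2
  match PySem.List.pyGet? lst mid with
  | none => BSState.hit low  -- IndexError in Python; excluded by Pre_ (value irrelevant)
  | some v =>
    if v = item then BSState.hit mid
    else if v < item then BSState.range (mid + 1) high
    else BSState.range low (mid - 1)

-- The while-loop of Source B: iterate bsStep while the state is a nonempty range.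
def bsRun (lst : List Int) (item : Int) (s : BSState) : BSState :=
  match s with
  | BSState.hit i => BSState.hit i
  | BSState.range lo hi =>
    if h : lo ≤ hi then bsRun lst item (bsStep lst item lo hi) else BSState.range lo hi
termination_by (match s with | BSState.hit _ => 0 | BSState.range lo hi => (hi - lo + 1).toNat)
decreasing_by
  have hb := PySem.Int.floordiv_two_mid_bounds (lo := lo) (hi := hi) h
  simp only [bsStep]
  split
  · omega
  · rename_i lo' hi' heq
    split at heq
    · exact absurd heq (by simp)
    · split at heq
      · exact absurd heq (by simp)
      · split at heq
        · cases heq; omega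
        · cases heq; omega

def binary_search_recursive_modified_alt (lst : List Int) (item : Int) (low : Int) (high : Int) : Option Int :=
  if low > high then none
  else
    match bsRun lst item (BSState.range low high) with
    | BSState.hit i => some i
    | BSState.range lo _ => some lo   -- final low = insertion point (lst.insert there)

-- ===== PRECONDITION & SPEC =====
-- Pre_ excludes nonempty initial ranges [low,high] not contained in Python's valid index
-- range [-len, len): there A's lst[mid] in general raises IndexError. (A few such inputs
-- still return via lucky in-range mids; their closed-form characterisation would amount to
-- re-simulating the search, so they are excluded too — B behaves the same there anyway.)
def Pre_binary_search_recursive_modified (lst : List Int) (item : Int) (low : Int) (high : Int) : Prop :=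
  low > high ∨ (-(lst.length : Int) ≤ low ∧ high < (lst.length : Int))
instance (lst : List Int) (item : Int) (low : Int) (high : Int) : Decidable (Pre_binary_search_recursive_modified lst item low high) := by unfold Pre_binary_search_recursive_modified; infer_instance

def pvWitness_binary_search_recursive_modified : List Int × Int × Int × Int := ([1, 3, 5], 4, 0, 2)

def Spec_binary_search_recursive_modified (lst : List Int) (item : Int) (low : Int) (high : Int) (out : Option Int) : Prop := out = binary_search_recursive_modified_alt lst item low high
instance (lst : List Int) (item : Int) (low : Int) (high : Int) (out : Option Int) : Decidable (Spec_binary_search_recursive_modified lst item low high out) := by unfold Spec_binary_search_recursive_modified; infer_instance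

-- ===== CLAIM (what is proved, stated in full; the proofs are below) =====
def Claim_equal_binary_search_recursive_modified : Prop := ∀ (lst : List Int) (item : Int) (low : Int) (high : Int), Dom_binary_search_recursive_modified lst item low high → Pre_binary_search_recursive_modified lst item low high → Spec_binary_search_recursive_modified lst item low high (binary_search_recursive_modified lst item low high)

-- ===== LEMMAS AND PROOFS =====

-- Extraction of B's answer from a final state.
def bsOut (s : BSState) : Option Int :=
  match s with
  | BSState.hit i => some i
  | BSState.range lo _ => some lo

-- On an in-bounds, nonempty range A equals B's iterated state machine; induction on range size.
theorem bs_key (lst : List Int) (item : Int) : ∀ (n : Nat) (low high : Int),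
    (high - low).toNat < n → -(lst.length : Int) ≤ low → high < (lst.length : Int) → low ≤ high →
    binary_search_recursive_modified lst item low high = bsOut (bsRun lst item (BSState.range low high)) := by
  intro n
  induction n with
  | zero => intro low high h; omega
  | succ n ih =>
    intro low high hn hl hh hlh
    have hmid := PySem.Int.floordiv_two_mid_bounds (lo := low) (hi := high) hlh
    set mid := PySem.Int.floordiv (low + high) 2 with hmiddef
    have hget : ∃ v, PySem.List.pyGet? lst mid = some v := by
      cases hv : PySem.List.pyGet? lst mid with
      | some v => exact ⟨v, rfl⟩
      | none =>
        rw [PySem.List.pyGet?_eq_none_iff] at hv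
        exact absurd (by unfold PySem.Raise.InRange; omega) hv
    obtain ⟨v, hv⟩ := hget
    rw [binary_search_recursive_modified, bsRun]
    simp only [if_pos hlh, dif_pos hlh, bsStep, ← hmiddef, hv]
    by_cases he : v = item
    · simp [he, bsRun, bsOut]
    · by_cases hgt : v > item
      · have hlt : ¬ v < item := by omega
        simp only [if_neg he, if_pos hgt, if_neg hlt]
        by_cases hx : low > mid - 1
        · rw [if_pos hx, bsRun, dif_neg (by omega)]
          exact congrArg (some ·) (by omega)
        · rw [if_neg hx, ih low (mid - 1) (by omega) hl (by omega) (by omega)]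
      · have hlt : v < item := by omega
        simp only [if_neg he, if_neg hgt, if_pos hlt]
        by_cases hx : mid + 1 > high
        · rw [if_pos hx, bsRun, dif_neg (by omega)]; rfl
        · rw [if_neg hx, ih (mid + 1) high (by omega) (by omega) hh (by omega)]

-- ===== VERDICT (by name: the statement is the Claim_ definition above) =====
theorem binary_search_recursive_modified_spec : Claim_equal_binary_search_recursive_modified := by
  intro lst item low high _ hpre
  unfold Spec_binary_search_recursive_modified binary_search_recursive_modified_alt
  by_cases h : low > high
  · rw [if_pos h, binary_search_recursive_modified, if_neg (by omega)]
  · rw [if_neg h]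
    rcases hpre with hpre | ⟨hl, hh⟩
    · omega
    · have := bs_key lst item ((high - low).toNat + 1) low high (by omega) hl hh (by omega)
      rw [this]; unfold bsOut
      cases bsRun lst item (BSState.range low high) <;> rfl
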